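-- pv_equiv track=rewrite | github.com/mgiannopoulos24/Leetcode | Python/1434.py | numberWays
-- ===== SOURCE A (Python) =====
-- from typing import List
--
-- MOD = 10**9 + 7
--
-- def numberWays(hats: List[List[int]]) -> int:
--     n = len(hats)  # Number of people
--
--     # Create a list of people who like each hat
--     hat_to_people = [[] for _ in range(41)]  # hats are 1-indexed, so use size 41
--     for person, hat_list in enumerate(hats):
--         for hat in hat_list:
--             hat_to_people[hat].append(person)
--
--     # dp[mask] represents the number of ways to assign hats given the current mask
--     dp = [0] * (1 << n)
--     dp[0] = 1  # Base case: one way to assign 0 hats (do nothing)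
--
--     # Iterate over each hat from 1 to 40
--     for hat in range(1, 41):
--         # Work backwards to avoid overwriting dp states within the same hat
--         new_dp = dp[:]  # Create a copy of dp to use for updating states
--         for mask in range((1 << n)):
--             if dp[mask] == 0:
--                 continue
--             # Try to assign the current hat to each person who likes this hat
--             for person in hat_to_people[hat]:
--                 if not (mask & (1 << person)):  # If this person hasn't been assigned a hat
--                     new_mask = mask | (1 << person)  # Assign hat to this person
--                     new_dp[new_mask] = (new_dp[new_mask] + dp[mask]) % MOD
--         dp = new_dp  # Update dp to reflect new states
--
--     # The answer is the number of ways to assign hats such that all people have hats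
--     return dp[(1 << n) - 1]
-- ===== SOURCE B (Python) =====
-- MOD = 10**9 + 7
--
-- def numberWays(hats):
--     n = len(hats)
--     full = (1 << n) - 1
--     # same hat index as A (hats are 1-indexed, size 41)
--     hat_to_people = [[] for _ in range(41)]
--     for person, hat_list in enumerate(hats):
--         for hat in hat_list:
--             hat_to_people[hat].append(person)
--     memo = {}
--
--     def f(hat, mask):
--         # ways to hand out hats hat..40 so that every person not yet in mask gets one
--         if mask == full:
--             return 1
--         if hat > 40:
--             return 0
--         key = (hat, mask)
--         if key in memo:
--             return memo[key]
--         total = f(hat + 1, mask)           # nobody takes this hat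
--         for p in hat_to_people[hat]:
--             if mask & (1 << p) == 0:
--                 total += f(hat + 1, mask | (1 << p))
--         total %= MOD
--         memo[key] = total
--         return total
--
--     return f(1, 0)
-- ===== Notes on version B (the rewrite author's own statement) =====
-- stated objective: alternative
-- what changed: Replaces A's bottom-up DP that sweeps all 2^n masks for each of the 40 hats with a top-down memoized recursion f(hat, mask) over the same hat_to_people index that lazily explores only reachable (hat, mask) states.
import Mathlib
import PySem

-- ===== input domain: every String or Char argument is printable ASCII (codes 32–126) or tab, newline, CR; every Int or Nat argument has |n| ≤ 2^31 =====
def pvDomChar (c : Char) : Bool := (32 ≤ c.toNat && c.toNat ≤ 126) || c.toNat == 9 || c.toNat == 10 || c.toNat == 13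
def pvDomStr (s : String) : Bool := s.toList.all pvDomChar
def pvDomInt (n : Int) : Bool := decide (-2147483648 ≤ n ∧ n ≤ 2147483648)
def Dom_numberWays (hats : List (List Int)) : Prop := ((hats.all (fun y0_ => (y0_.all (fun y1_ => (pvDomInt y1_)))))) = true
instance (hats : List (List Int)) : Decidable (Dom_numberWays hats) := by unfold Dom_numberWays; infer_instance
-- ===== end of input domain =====

-- B replaces A's bottom-up sweep over all 2^n masks per hat by a top-down memoized
-- recursion f(hat, mask) that only visits reachable states (objective: alternative).

-- ===== PORT A =====
-- shared preprocessing (identical code in Source A and Source B): hat_to_people index.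
-- Python list indexing wraps negative indices; exact for -41 ≤ hat ≤ 40 (= Pre_); Python raises IndexError outside.
def pvBuildIndex (hats : List (List Int)) : List (List Nat) :=
  hats.zipIdx.foldl
    (fun acc pl =>
      pl.1.foldl
        (fun acc hat =>
          let i : Nat := (if hat < 0 then hat + 41 else hat).toNat
          acc.set i (acc.getD i [] ++ [pl.2]))
        acc)
    (List.replicate 41 [])

-- body of A's outer loop over hats: one sweep over all masks, updating new_dp
def pvStep (htp : List (List Nat)) (L : Nat) (dp : List Int) (hat : Nat) : List Int :=
  (List.range L).foldl
    (fun nd mask =>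
      if dp.getD mask 0 = 0 then nd
      else
        (htp.getD hat []).foldl
          (fun nd person =>
            if mask &&& (1 <<< person) = 0 then
              nd.set (mask ||| (1 <<< person))
                ((nd.getD (mask ||| (1 <<< person)) 0 + dp.getD mask 0) % 1000000007)
            else nd)
          nd)
    dp

def numberWays (hats : List (List Int)) : Int :=
  let n := hats.length
  let htp := pvBuildIndex hats
  let dp0 := (List.replicate (1 <<< n) (0 : Int)).set 0 1
  let dpF := (List.range' 1 40).foldl (pvStep htp (1 <<< n)) dp0
  dpF.getD ((1 <<< n) - 1) 0

-- ===== PORT B =====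
-- f(hat, mask) with memo dict; fuel = 41 - hat makes the recursion structural (fuel 0 ↔ hat > 40)
def pvAltF (htp : List (List Nat)) (full : Nat) :
    Nat → Nat → Nat → PySem.Dict (Nat × Nat) Int → Int × PySem.Dict (Nat × Nat) Int
  | fuel, hat, mask, memo =>
    if mask = full then (1, memo)
    else
      match fuel with
      | 0 => (0, memo)
      | fuel + 1 =>
        match memo.get? (hat, mask) with
        | some v => (v, memo)
        | none =>
          let r0 := pvAltF htp full fuel (hat + 1) mask memo
          let r := (htp.getD hat []).foldl
            (fun (acc : Int × PySem.Dict (Nat × Nat) Int) p =>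
              if mask &&& (1 <<< p) = 0 then
                let r2 := pvAltF htp full fuel (hat + 1) (mask ||| (1 <<< p)) acc.2
                (acc.1 + r2.1, r2.2)
              else acc)
            r0
          let t := r.1 % 1000000007
          (t, r.2.insert (hat, mask) t)

def numberWays_alt (hats : List (List Int)) : Int :=
  let htp := pvBuildIndex hats
  (pvAltF htp ((1 <<< hats.length) - 1) 40 1 0 PySem.Dict.empty).1

-- ===== PRECONDITION & SPEC =====
-- Pre_ excludes exactly the inputs where both programs raise IndexError (a hat value outside -41..40).
def Pre_numberWays (hats : List (List Int)) : Prop :=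
  ∀ l ∈ hats, ∀ h ∈ l, -41 ≤ h ∧ h ≤ 40
instance (hats : List (List Int)) : Decidable (Pre_numberWays hats) := by
  unfold Pre_numberWays; infer_instance
def pvWitness_numberWays : List (List Int) := [[1, 2], [1]]

def Spec_numberWays (hats : List (List Int)) (out : Int) : Prop := out = numberWays_alt hats
instance (hats : List (List Int)) (out : Int) : Decidable (Spec_numberWays hats out) := by
  unfold Spec_numberWays; infer_instance

-- ===== CLAIM (what is proved, stated in full; the proofs are below) =====
def Claim_equal_numberWays : Prop :=
  ∀ (hats : List (List Int)), Dom_numberWays hats → Pre_numberWays hats →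
    Spec_numberWays hats (numberWays hats)

-- ===== LEMMAS AND PROOFS =====

-- the memo-free value of B's recursion
def pvW (htp : List (List Nat)) (full : Nat) : Nat → Nat → Nat → Int
  | fuel, hat, mask =>
    if mask = full then 1
    else
      match fuel with
      | 0 => 0
      | fuel + 1 =>
        ((htp.getD hat []).foldl
          (fun acc p =>
            if mask &&& (1 <<< p) = 0 then acc + pvW htp full fuel (hat + 1) (mask ||| (1 <<< p))
            else acc)
          (pvW htp full fuel (hat + 1) mask)) % 1000000007

theorem pvW_def (htp : List (List Nat)) (full fuel hat mask : Nat) :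
    pvW htp full fuel hat mask
      = if mask = full then 1
        else
          match fuel with
          | 0 => 0
          | fuel + 1 =>
            ((htp.getD hat []).foldl
              (fun acc p =>
                if mask &&& (1 <<< p) = 0 then acc + pvW htp full fuel (hat + 1) (mask ||| (1 <<< p))
                else acc)
              (pvW htp full fuel (hat + 1) mask)) % 1000000007 := by
  cases fuel <;> rfl

theorem pvW_succ_def (htp : List (List Nat)) (full fuel hat mask : Nat) :
    pvW htp full (fuel + 1) hat mask
      = if mask = full then (1 : Int)
        else
          ((htp.getD hat []).foldl
            (fun acc p =>
              if mask &&& (1 <<< p) = 0 then acc + pvW htp full fuel (hat + 1) (mask ||| (1 <<< p))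
              else acc)
            (pvW htp full fuel (hat + 1) mask)) % 1000000007 := rfl

def pvMemoOK (htp : List (List Nat)) (full : Nat) (memo : PySem.Dict (Nat × Nat) Int) : Prop :=
  ∀ h m v, memo.get? (h, m) = some v → v = pvW htp full (41 - h) h m

theorem pvAltF_correct (htp : List (List Nat)) (full : Nat) :
    ∀ fuel hat mask memo, hat + fuel = 41 → pvMemoOK htp full memo →
      (pvAltF htp full fuel hat mask memo).1 = pvW htp full fuel hat mask ∧
      pvMemoOK htp full (pvAltF htp full fuel hat mask memo).2 := by
  intro fuel
  induction fuel with
  | zero =>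
    intro hat mask memo _ hm
    rw [pvAltF, pvW_def]
    by_cases hf : mask = full
    · simp [hf, hm]
    · simp [hf, hm]
  | succ fuel ih =>
    intro hat mask memo h41 hm
    by_cases hf : mask = full
    · rw [pvAltF, pvW_def, if_pos hf, if_pos hf]
      exact ⟨rfl, hm⟩
    · have h41' : (hat + 1) + fuel = 41 := by omega
      rw [pvAltF, if_neg hf]
      cases hmem : memo.get? (hat, mask) with
      | some v =>
        dsimp only
        constructor
        · rw [hm hat mask v hmem]
          congr 1
          omega
        · exact hm
      | none =>
        obtain ⟨e0, m0⟩ := ih (hat + 1) mask memo h41' hm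
        have inner : ∀ (l : List Nat) (a : Int) (mm : PySem.Dict (Nat × Nat) Int),
            pvMemoOK htp full mm →
            (l.foldl
                (fun (acc : Int × PySem.Dict (Nat × Nat) Int) p =>
                  if mask &&& (1 <<< p) = 0 then
                    ((acc.1 + (pvAltF htp full fuel (hat + 1) (mask ||| (1 <<< p)) acc.2).1,
                      (pvAltF htp full fuel (hat + 1) (mask ||| (1 <<< p)) acc.2).2) :
                      Int × PySem.Dict (Nat × Nat) Int)
                  else acc)
                (a, mm)).1
              = l.foldl
                  (fun acc p =>
                    if mask &&& (1 <<< p) = 0 then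
                      acc + pvW htp full fuel (hat + 1) (mask ||| (1 <<< p))
                    else acc)
                  a ∧
            pvMemoOK htp full
              (l.foldl
                (fun (acc : Int × PySem.Dict (Nat × Nat) Int) p =>
                  if mask &&& (1 <<< p) = 0 then
                    ((acc.1 + (pvAltF htp full fuel (hat + 1) (mask ||| (1 <<< p)) acc.2).1,
                      (pvAltF htp full fuel (hat + 1) (mask ||| (1 <<< p)) acc.2).2) :
                      Int × PySem.Dict (Nat × Nat) Int)
                  else acc)
                (a, mm)).2 := by
          intro l
          induction l with
          | nil => intro a mm hmm; exact ⟨rfl, hmm⟩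
          | cons p t iht =>
            intro a mm hmm
            by_cases hc : mask &&& (1 <<< p) = 0
            · simp only [List.foldl_cons, if_pos hc]
              obtain ⟨e2, m2⟩ := ih (hat + 1) (mask ||| (1 <<< p)) mm h41' hmm
              rw [← e2]
              exact iht _ _ m2
            · simp only [List.foldl_cons, if_neg hc]
              exact iht a mm hmm
        obtain ⟨eI, mI⟩ := inner (htp.getD hat [])
          (pvAltF htp full fuel (hat + 1) mask memo).1
          (pvAltF htp full fuel (hat + 1) mask memo).2 m0
        dsimp only
        have hval : (((htp.getD hat []).foldl
            (fun (acc : Int × PySem.Dict (Nat × Nat) Int) p =>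
              if mask &&& (1 <<< p) = 0 then
                ((acc.1 + (pvAltF htp full fuel (hat + 1) (mask ||| (1 <<< p)) acc.2).1,
                  (pvAltF htp full fuel (hat + 1) (mask ||| (1 <<< p)) acc.2).2) :
                  Int × PySem.Dict (Nat × Nat) Int)
              else acc)
            ((pvAltF htp full fuel (hat + 1) mask memo).1,
              (pvAltF htp full fuel (hat + 1) mask memo).2)).1 % 1000000007)
            = pvW htp full (fuel + 1) hat mask := by
          rw [eI, e0, pvW_succ_def, if_neg hf]
        constructor
        · exact hval
        · intro h' m' v' hget
          by_cases hk : (h', m') = (hat, mask)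
          · have h1 : h' = hat := congrArg Prod.fst hk
            have h2 : m' = mask := congrArg Prod.snd hk
            subst h1; subst h2
            rw [PySem.Dict.get?_insert_self] at hget
            injection hget with hv
            rw [← hv]
            have h41'' : 41 - h' = fuel + 1 := by omega
            rw [h41'']
            exact hval
          · rw [PySem.Dict.get?_insert_of_ne _ _ hk] at hget
            exact mI h' m' v' hget

theorem numberWays_alt_eq_pvW (hats : List (List Int)) :
    numberWays_alt hats
      = pvW (pvBuildIndex hats) ((1 <<< hats.length) - 1) 40 1 0 := by
  have hempty : pvMemoOK (pvBuildIndex hats) ((1 <<< hats.length) - 1)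
      PySem.Dict.empty := by
    intro h m v hget
    rw [PySem.Dict.get?_empty] at hget
    cases hget
  exact (pvAltF_correct (pvBuildIndex hats) ((1 <<< hats.length) - 1)
    40 1 0 PySem.Dict.empty (by omega) hempty).1

-- A side -----------------------------------------------------------------

def pvSum (L : Nat) (dp : List Int) (w : Nat → Int) : Int :=
  ∑ m ∈ Finset.range L, dp.getD m 0 * w m

def pvApply (dp : List Int) (incs : List (Nat × Int)) : List Int :=
  incs.foldl (fun nd iv => nd.set iv.1 ((nd.getD iv.1 0 + iv.2) % 1000000007)) dp

def pvIncs (htp : List (List Nat)) (hat : Nat) (L : Nat) (dp : List Int) : List (Nat × Int) :=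
  (List.range L).flatMap
    (fun m =>
      if dp.getD m 0 = 0 then []
      else
        ((htp.getD hat []).filter (fun q => decide (m &&& (1 <<< q) = 0))).map
          (fun q => (m ||| (1 <<< q), dp.getD m 0)))

theorem pv_getD_set {α : Type} (l : List α) (j : Nat) (v : α) (i : Nat) (d : α) :
    (l.set j v).getD i d = if j = i ∧ j < l.length then v else l.getD i d := by
  rcases Nat.lt_or_ge i l.length with hi | hi
  · simp only [List.getD_eq_getElem?_getD, List.getElem?_set]
    split_ifs with h1 h2 h3 <;> simp_all
  · have h1 : (l.set j v)[i]? = none := by simp; omega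
    have h2 : l[i]? = none := by simp; omega
    simp only [List.getD_eq_getElem?_getD, h1, h2]
    have : ¬ (j = i ∧ j < l.length) := by omega
    simp [this]

theorem pv_foldl_flatMap {α β γ : Type} (l : List α) (g : α → List β) (F : γ → β → γ) (b : γ) :
    (l.flatMap g).foldl F b = l.foldl (fun b m => (g m).foldl F b) b := by
  induction l generalizing b with
  | nil => rfl
  | cons a t ih => simp [List.foldl_append, ih]

theorem pv_sum_map_flatMap {α β : Type} (l : List α) (g : α → List β) (f : β → Int) :
    ((l.flatMap g).map f).sum = (l.map (fun a => ((g a).map f).sum)).sum := by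
  induction l with
  | nil => rfl
  | cons a t ih => simp [ih]

theorem pv_foldl_if (l : List Nat) (c : Nat → Prop) [DecidablePred c] (g : Nat → Int) :
    ∀ a : Int, l.foldl (fun acc q => if c q then acc + g q else acc) a
      = a + ((l.filter (fun q => decide (c q))).map g).sum := by
  induction l with
  | nil => simp
  | cons q t ih =>
    intro a
    by_cases h : c q
    · simp [h, ih, add_assoc]
    · simp [h, ih]

theorem pvSum_set (L : Nat) (dp : List Int) (w : Nat → Int) (i : Nat) (x : Int)
    (hi : i < L) (hlen : dp.length = L) :
    pvSum L (dp.set i x) w = pvSum L dp w + (x - dp.getD i 0) * w i := by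
  unfold pvSum
  have key : ∀ m ∈ Finset.range L,
      (dp.set i x).getD m 0 * w m
        = dp.getD m 0 * w m + (if i = m then (x - dp.getD i 0) * w i else 0) := by
    intro m hm
    rw [pv_getD_set]
    by_cases h : i = m
    · subst h; simp [hlen, hi]; ring
    · simp [h]
  rw [Finset.sum_congr rfl key, Finset.sum_add_distrib, Finset.sum_ite_eq]
  simp [hi]

theorem pvApply_length' (incs : List (Nat × Int)) :
    ∀ dp : List Int, (pvApply dp incs).length = dp.length := by
  induction incs with
  | nil => intro dp; rfl
  | cons iv rest ih => intro dp; rw [pvApply, List.foldl_cons, ← pvApply, ih]; simp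

theorem pvApply_sum (L : Nat) (w : Nat → Int) :
    ∀ (incs : List (Nat × Int)) (dp : List Int), dp.length = L →
      (∀ iv ∈ incs, iv.1 < L) →
      ((pvSum L (pvApply dp incs) w : Int) : ZMod 1000000007)
        = ((pvSum L dp w : Int) : ZMod 1000000007)
          + (((incs.map (fun iv => iv.2 * w iv.1)).sum : Int) : ZMod 1000000007) := by
  intro incs
  induction incs with
  | nil => intro dp _ _; simp [pvApply]
  | cons iv rest ih =>
    intro dp hlen hb
    rw [pvApply, List.foldl_cons, ← pvApply]
    have hi : iv.1 < L := hb iv (by simp)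
    rw [ih _ (by simp [hlen]) (fun x hx => hb x (by simp [hx]))]
    rw [pvSum_set L dp w iv.1 _ hi hlen]
    push_cast
    have hmod : (((dp.getD iv.1 0 + iv.2) % 1000000007 : Int) : ZMod 1000000007)
        = ((dp.getD iv.1 0 + iv.2 : Int) : ZMod 1000000007) := by
      have := ZMod.intCast_mod (dp.getD iv.1 0 + iv.2) 1000000007
      simpa using this
    rw [hmod]
    push_cast
    simp only [List.map_cons, List.sum_cons]
    push_cast
    ring

theorem pvStep_eq_apply (htp : List (List Nat)) (L : Nat) (dp : List Int) (hat : Nat) :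
    pvStep htp L dp hat = pvApply dp (pvIncs htp hat L dp) := by
  rw [pvStep, pvIncs, pvApply, pv_foldl_flatMap]
  apply PySem.List.foldl_congr_mem
  intro nd m _
  by_cases h0 : dp.getD m 0 = 0
  · rw [if_pos h0, if_pos h0]
    rfl
  · rw [if_neg h0, if_neg h0]
    generalize htp.getD hat [] = people
    induction people generalizing nd with
    | nil => rfl
    | cons q t ih =>
      by_cases hc : m &&& (1 <<< q) = 0
      · simp only [List.foldl_cons, if_pos hc, List.filter_cons]
        simp only [decide_eq_true_eq, hc, if_true]
        simp only [List.map_cons, List.foldl_cons]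
        exact ih _
      · simp only [List.foldl_cons, if_neg hc, List.filter_cons]
        have hd : (decide (m &&& (1 <<< q) = 0)) = false := by simp [hc]
        simp only [hd, Bool.false_eq_true, if_false]
        exact ih nd

theorem pvIncs_bound (htp : List (List Nat)) (hat L : Nat) (dp : List Int) (n : Nat)
    (hL : L = 2 ^ n) (hq : ∀ q ∈ htp.getD hat [], q < n) :
    ∀ iv ∈ pvIncs htp hat L dp, iv.1 < L := by
  intro iv hiv
  rw [pvIncs] at hiv
  simp only [List.mem_flatMap, List.mem_range] at hiv
  obtain ⟨m, hm, hmem⟩ := hiv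
  split_ifs at hmem
  · simp at hmem
  · simp only [List.mem_map, List.mem_filter] at hmem
    obtain ⟨q, ⟨hq1, _⟩, rfl⟩ := hmem
    have h1 : 1 <<< q < L := by
      rw [Nat.one_shiftLeft, hL]
      exact Nat.pow_lt_pow_right (by omega) (hq q hq1)
    rw [hL] at hm h1 ⊢
    exact Nat.or_lt_two_pow hm h1

theorem pvIncs_weight_sum (htp : List (List Nat)) (hat L : Nat) (dp : List Int) (w : Nat → Int) :
    ((pvIncs htp hat L dp).map (fun iv => iv.2 * w iv.1)).sum
      = ∑ m ∈ Finset.range L,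
          dp.getD m 0 *
            (((htp.getD hat []).filter (fun q => decide (m &&& (1 <<< q) = 0))).map
              (fun q => w (m ||| (1 <<< q)))).sum := by
  rw [pvIncs, pv_sum_map_flatMap]
  have hrange : ∀ F : Nat → Int, ((List.range L).map F).sum = ∑ m ∈ Finset.range L, F m :=
    fun F => rfl
  rw [hrange]
  apply Finset.sum_congr rfl
  intro m _
  by_cases h0 : dp.getD m 0 = 0
  · rw [if_pos h0, h0]
    simp
  · rw [if_neg h0]
    simp only [List.map_map]
    rw [← PySem.List.sum_map_const_mul_int]
    congr 1

-- one-step unfolding of pvW in summed form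
theorem pvW_succ (htp : List (List Nat)) (full : Nat) (fuel hat mask n : Nat)
    (hfull : full = 2 ^ n - 1) (hq : ∀ q ∈ htp.getD hat [], q < n) :
    pvW htp full (fuel + 1) hat mask
      = (pvW htp full fuel (hat + 1) mask
          + (((htp.getD hat []).filter (fun q => decide (mask &&& (1 <<< q) = 0))).map
              (fun q => pvW htp full fuel (hat + 1) (mask ||| (1 <<< q)))).sum) % 1000000007 := by
  by_cases hf : mask = full
  · have hfilter : (htp.getD hat []).filter (fun q => decide (mask &&& (1 <<< q) = 0)) = [] := by
      rw [List.filter_eq_nil_iff]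
      intro q hq1
      have hb : mask &&& (1 <<< q) = 1 <<< q := by
        subst hf hfull
        rw [Nat.one_shiftLeft, Nat.and_two_pow]
        simp [Nat.testBit_two_pow_sub_one, hq q hq1]
      simp only [decide_eq_true_eq]
      rw [hb, Nat.one_shiftLeft]
      exact (Nat.two_pow_pos q).ne'
    have h1 : pvW htp full fuel (hat + 1) mask = 1 := by
      rw [pvW_def, if_pos hf]
    rw [pvW_def, if_pos hf, h1, hfilter]
    norm_num
  · rw [pvW_succ_def, if_neg hf]
    rw [pv_foldl_if _ (fun q => mask &&& (1 <<< q) = 0)]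

theorem pvW_range (htp : List (List Nat)) (full : Nat) (fuel hat mask : Nat) :
    0 ≤ pvW htp full fuel hat mask ∧ pvW htp full fuel hat mask < 1000000007 := by
  rw [pvW_def]
  by_cases hf : mask = full
  · simp [hf]
  · rw [if_neg hf]
    cases fuel with
    | zero => simp
    | succ fuel =>
      constructor
      · exact Int.emod_nonneg _ (by norm_num)
      · exact Int.emod_lt_of_pos _ (by norm_num)

-- dp entries stay in [0, p)
def pvInRange (dp : List Int) : Prop := ∀ x ∈ dp, 0 ≤ x ∧ x < 1000000007

theorem pvApply_inRange (incs : List (Nat × Int)) :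
    ∀ dp : List Int, pvInRange dp → pvInRange (pvApply dp incs) := by
  induction incs with
  | nil => intro dp h; exact h
  | cons iv rest ih =>
    intro dp h
    rw [pvApply, List.foldl_cons, ← pvApply]
    apply ih
    intro x hx
    rcases List.mem_or_eq_of_mem_set hx with hmem | rfl
    · exact h x hmem
    · exact ⟨Int.emod_nonneg _ (by norm_num), Int.emod_lt_of_pos _ (by norm_num)⟩

theorem pvBuildIndex_mem_lt (hats : List (List Int)) :
    ∀ i q, q ∈ (pvBuildIndex hats).getD i [] → q < hats.length := by
  unfold pvBuildIndex
  refine List.foldlRecOn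
    (motive := fun (acc : List (List Nat)) =>
      ∀ i q, q ∈ acc.getD i [] → q < hats.length) _ _ ?_ ?_
  · intro i q hq
    rw [List.getD_eq_getElem?_getD, List.getElem?_replicate] at hq
    split_ifs at hq <;> simp_all
  · intro acc hacc pl hpl
    have hk : pl.2 < hats.length := by
      have := List.mem_zipIdx hpl; omega
    refine List.foldlRecOn
      (motive := fun (acc : List (List Nat)) =>
        ∀ i q, q ∈ acc.getD i [] → q < hats.length) _ _ hacc ?_
    intro acc' hacc' hat _ i q hq
    simp only at hq
    set j : Nat := (if hat < 0 then hat + 41 else hat).toNat with hj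
    rw [pv_getD_set] at hq
    split_ifs at hq with hcond
    · rcases List.mem_append.mp hq with h | h
      · exact hacc' _ _ h
      · rw [List.mem_singleton] at h; omega
    · exact hacc' _ _ hq

def pvDpAt (htp : List (List Nat)) (L h : Nat) : List Int :=
  (List.range' 1 h).foldl (pvStep htp L) ((List.replicate L (0 : Int)).set 0 1)

theorem pvDpAt_succ (htp : List (List Nat)) (L h : Nat) :
    pvDpAt htp L (h + 1) = pvStep htp L (pvDpAt htp L h) (1 + h) := by
  rw [pvDpAt, List.range'_1_concat, List.foldl_append]
  rfl

theorem pvDpAt_length (htp : List (List Nat)) (L h : Nat) :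
    (pvDpAt htp L h).length = L := by
  induction h with
  | zero => simp [pvDpAt]
  | succ h ih => rw [pvDpAt_succ, pvStep_eq_apply, pvApply_length', ih]

theorem pvDpAt_inRange (htp : List (List Nat)) (L h : Nat) :
    pvInRange (pvDpAt htp L h) := by
  induction h with
  | zero =>
    intro x hx
    rcases List.mem_or_eq_of_mem_set hx with hmem | rfl
    · rw [List.eq_of_mem_replicate hmem]; norm_num
    · norm_num
  | succ h ih =>
    rw [pvDpAt_succ, pvStep_eq_apply]
    exact pvApply_inRange _ _ ih

theorem pvSum_dp0 (L : Nat) (hL : 0 < L) (w : Nat → Int) :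
    pvSum L ((List.replicate L (0 : Int)).set 0 1) w = w 0 := by
  unfold pvSum
  rw [Finset.sum_eq_single 0]
  · rw [pv_getD_set]
    simp [hL]
  · intro b _ hb
    rw [pv_getD_set]
    have : ¬ ((0 : Nat) = b ∧ 0 < (List.replicate L (0:Int)).length) := by omega
    rw [if_neg this]
    rcases Nat.lt_or_ge b L with h | h
    · simp [List.getD_eq_getElem?_getD, h]
    · have : (List.replicate L (0:Int))[b]? = none := by simp; omega
      simp [List.getD_eq_getElem?_getD, this]
  · intro h
    exact absurd (Finset.mem_range.mpr hL) h

theorem pv_telescope (htp : List (List Nat)) (n L full : Nat)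
    (hL : L = 2 ^ n) (hfull : full = L - 1)
    (hq : ∀ i q, q ∈ htp.getD i [] → q < n) :
    ∀ h, h ≤ 40 →
      ((pvSum L (pvDpAt htp L h) (pvW htp full (40 - h) (h + 1)) : Int) : ZMod 1000000007)
        = ((pvW htp full 40 1 0 : Int) : ZMod 1000000007) := by
  intro h
  induction h with
  | zero =>
    intro _
    norm_num
    simp only [pvDpAt, List.range'_zero, List.foldl_nil]
    rw [pvSum_dp0 L (by rw [hL]; positivity)]
  | succ h ih =>
    intro hh
    have ih' := ih (by omega)
    have h40 : 40 - h = (40 - (h + 1)) + 1 := by omega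
    set fuel := 40 - (h + 1) with hfuel
    have hhat : 1 + h = h + 1 := by omega
    rw [pvDpAt_succ, hhat, pvStep_eq_apply]
    rw [pvApply_sum L _ _ _ (pvDpAt_length htp L h)
      (pvIncs_bound htp (h+1) L _ n hL (hq (h+1)))]
    rw [pvIncs_weight_sum]
    have hfull' : full = 2 ^ n - 1 := by omega
    have cast_key : ∀ m ∈ Finset.range L,
        ((((pvDpAt htp L h).getD m 0 * pvW htp full fuel (h + 1 + 1) m
          + (pvDpAt htp L h).getD m 0 *
              (((htp.getD (h+1) []).filter (fun q => decide (m &&& (1 <<< q) = 0))).map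
                (fun q => pvW htp full fuel (h + 1 + 1) (m ||| (1 <<< q)))).sum : Int))
            : ZMod 1000000007)
          = (((pvDpAt htp L h).getD m 0 * pvW htp full (fuel + 1) (h + 1) m : Int)
            : ZMod 1000000007) := by
      intro m hm
      rw [pvW_succ htp full fuel (h+1) m n hfull' (hq (h+1))]
      rw [Int.cast_add, Int.cast_mul, Int.cast_mul, Int.cast_mul]
      rw [show ((((pvW htp full fuel (h + 1 + 1) m
            + (((htp.getD (h+1) []).filter (fun q => decide (m &&& (1 <<< q) = 0))).map
                (fun q => pvW htp full fuel (h + 1 + 1) (m ||| (1 <<< q)))).sum) % 1000000007 : Int))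
            : ZMod 1000000007)
          = (((pvW htp full fuel (h + 1 + 1) m
            + (((htp.getD (h+1) []).filter (fun q => decide (m &&& (1 <<< q) = 0))).map
                (fun q => pvW htp full fuel (h + 1 + 1) (m ||| (1 <<< q)))).sum : Int))
            : ZMod 1000000007) from by
        simpa using ZMod.intCast_mod ((pvW htp full fuel (h + 1 + 1) m
            + (((htp.getD (h+1) []).filter (fun q => decide (m &&& (1 <<< q) = 0))).map
                (fun q => pvW htp full fuel (h + 1 + 1) (m ||| (1 <<< q)))).sum)) 1000000007]
      rw [Int.cast_add]
      ring
    rw [← Int.cast_add]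
    have combine : (pvSum L (pvDpAt htp L h) (pvW htp full fuel (h + 1 + 1))
        + ∑ m ∈ Finset.range L,
            (pvDpAt htp L h).getD m 0 *
              (((htp.getD (h+1) []).filter (fun q => decide (m &&& (1 <<< q) = 0))).map
                (fun q => pvW htp full fuel (h + 1 + 1) (m ||| (1 <<< q)))).sum : Int)
        = ∑ m ∈ Finset.range L,
            ((pvDpAt htp L h).getD m 0 * pvW htp full fuel (h + 1 + 1) m
              + (pvDpAt htp L h).getD m 0 *
                  (((htp.getD (h+1) []).filter (fun q => decide (m &&& (1 <<< q) = 0))).map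
                    (fun q => pvW htp full fuel (h + 1 + 1) (m ||| (1 <<< q)))).sum) := by
      unfold pvSum
      rw [← Finset.sum_add_distrib]
    rw [combine, Int.cast_sum, Finset.sum_congr rfl cast_key, ← Int.cast_sum]
    rw [show (∑ m ∈ Finset.range L,
        (pvDpAt htp L h).getD m 0 * pvW htp full (fuel + 1) (h + 1) m : Int)
      = pvSum L (pvDpAt htp L h) (pvW htp full (fuel + 1) (h + 1)) from rfl]
    rw [h40] at ih'
    exact ih'

-- ===== VERDICT (by name: the statement is the Claim_ definition above) =====
theorem numberWays_spec : Claim_equal_numberWays := by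
  unfold Claim_equal_numberWays
  intro hats _ _
  unfold Spec_numberWays
  have hA : numberWays hats
      = (pvDpAt (pvBuildIndex hats) (1 <<< hats.length) 40).getD
          ((1 <<< hats.length) - 1) 0 := rfl
  rw [hA, numberWays_alt_eq_pvW]
  set n := hats.length with hn
  set htp := pvBuildIndex hats with hhtp
  set L := 1 <<< n with hLdef
  set full := L - 1 with hfulldef
  have hL2 : L = 2 ^ n := by rw [hLdef, Nat.one_shiftLeft]
  have hLpos : 0 < L := by rw [hL2]; positivity
  have hq : ∀ i q, q ∈ htp.getD i [] → q < n := pvBuildIndex_mem_lt hats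
  have htele := pv_telescope htp n L full hL2 hfulldef hq 40 (by omega)
  norm_num at htele
  have hw0 : ∀ m, pvW htp full 0 41 m = if m = full then (1 : Int) else 0 := by
    intro m
    rw [pvW_def]
  have hsum : pvSum L (pvDpAt htp L 40) (pvW htp full 0 41)
      = (pvDpAt htp L 40).getD full 0 := by
    unfold pvSum
    rw [Finset.sum_eq_single full]
    · rw [hw0]; simp
    · intro b _ hb
      rw [hw0]; simp [hb]
    · intro hnot
      exact absurd (Finset.mem_range.mpr (by omega)) hnot
  rw [hsum] at htele
  have hlen : (pvDpAt htp L 40).length = L := pvDpAt_length htp L 40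
  have hmem : (pvDpAt htp L 40).getD full 0 ∈ pvDpAt htp L 40 := by
    rw [List.getD_eq_getElem?_getD, List.getElem?_eq_getElem (by omega)]
    exact List.getElem_mem _
  have hrange := pvDpAt_inRange htp L 40 _ hmem
  have hWr := pvW_range htp full 40 1 0
  have hmodeq := (ZMod.intCast_eq_intCast_iff _ _ _).mp htele
  unfold Int.ModEq at hmodeq
  push_cast at hmodeq
  rw [Int.emod_eq_of_lt hrange.1 hrange.2, Int.emod_eq_of_lt hWr.1 hWr.2] at hmodeq
  exact hmodeq
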